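-- pv_equiv track=rewrite | github.com/Fnhid/sign-map-ros2 | relocal_eval/cold_start_relocal_eval.py | build_valid_query_indices
-- ===== SOURCE A (Python) =====
-- from typing import Dict, List, Optional, Sequence, Tuple
--
-- def build_valid_query_indices(total: int, map_exclude_radius: int) -> List[int]:
--     valid: List[int] = []
--     for qi in range(total):
--         lo = max(0, qi - map_exclude_radius)
--         hi = min(total - 1, qi + map_exclude_radius)
--         map_size = total - (hi - lo + 1)
--         if map_size > 0:
--             valid.append(qi)
--     return valid
-- ===== SOURCE B (Python) =====
-- from typing import List
--
-- def build_valid_query_indices(total: int, map_exclude_radius: int) -> List[int]: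
--     # An index qi is excluded exactly when its clamped window spans the whole
--     # array, i.e. qi <= map_exclude_radius and qi >= total - 1 - map_exclude_radius.
--     ex_lo = max(0, total - 1 - map_exclude_radius)
--     ex_hi = min(total - 1, map_exclude_radius)
--     if ex_lo > ex_hi:
--         return list(range(total))
--     return list(range(ex_lo)) + list(range(ex_hi + 1, total))
-- ===== Notes on version B (the rewrite author's own statement) =====
-- stated objective: faster
-- what changed: B replaces the per-index window recomputation loop with a single closed-form excluded interval [max(0,total-1-r), min(total-1,r)] and emits its complement as two ranges.
import Mathlib
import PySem

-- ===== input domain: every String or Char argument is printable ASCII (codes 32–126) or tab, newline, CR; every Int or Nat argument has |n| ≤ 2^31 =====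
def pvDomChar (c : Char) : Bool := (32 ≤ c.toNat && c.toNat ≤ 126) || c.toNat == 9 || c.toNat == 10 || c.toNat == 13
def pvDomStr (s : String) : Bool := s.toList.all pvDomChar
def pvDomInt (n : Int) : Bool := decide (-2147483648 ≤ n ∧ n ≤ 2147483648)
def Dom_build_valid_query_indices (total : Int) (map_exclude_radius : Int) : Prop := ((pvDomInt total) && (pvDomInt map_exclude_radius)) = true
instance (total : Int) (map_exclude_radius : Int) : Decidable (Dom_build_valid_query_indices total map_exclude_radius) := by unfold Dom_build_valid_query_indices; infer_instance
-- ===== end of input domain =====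

-- B change (objective): the per-index window loop of A is replaced by one closed-form
-- excluded interval whose complement is emitted as two ranges (constant arithmetic work).

-- ===== PORT A =====
def build_valid_query_indices (total : Int) (map_exclude_radius : Int) : List Int :=
  (PySem.List.pyRange 0 total 1).foldl (fun valid qi =>
    let lo := max 0 (qi - map_exclude_radius)
    let hi := min (total - 1) (qi + map_exclude_radius)
    let map_size := total - (hi - lo + 1)
    if map_size > 0 then valid ++ [qi] else valid) []

-- ===== PORT B =====
def build_valid_query_indices_alt (total : Int) (map_exclude_radius : Int) : List Int :=
  let ex_lo := max 0 (total - 1 - map_exclude_radius)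
  let ex_hi := min (total - 1) map_exclude_radius
  if ex_lo > ex_hi then PySem.List.pyRange 0 total 1
  else PySem.List.pyRange 0 ex_lo 1 ++ PySem.List.pyRange (ex_hi + 1) total 1

-- ===== PRECONDITION & SPEC =====
def Spec_build_valid_query_indices (total : Int) (map_exclude_radius : Int) (out : List Int) : Prop := out = build_valid_query_indices_alt total map_exclude_radius
instance (total : Int) (map_exclude_radius : Int) (out : List Int) : Decidable (Spec_build_valid_query_indices total map_exclude_radius out) := by unfold Spec_build_valid_query_indices; infer_instance

-- ===== CLAIM (what is proved, stated in full; the proofs are below) =====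
def Claim_equal_build_valid_query_indices : Prop := ∀ (total : Int) (map_exclude_radius : Int), Dom_build_valid_query_indices total map_exclude_radius → Spec_build_valid_query_indices total map_exclude_radius (build_valid_query_indices total map_exclude_radius)

-- ===== LEMMAS AND PROOFS =====

-- A as a filter over the index range
theorem buildA_eq_filter (total r : Int) :
    build_valid_query_indices total r =
      (PySem.List.pyRange 0 total 1).filter
        (fun qi => total - (min (total - 1) (qi + r) - max 0 (qi - r) + 1) > 0) := by
  unfold build_valid_query_indices
  rw [PySem.List.foldl_append_ite_eq_filter]
  simp

-- ===== VERDICT (by name: the statement is the Claim_ definition above) =====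
theorem build_valid_query_indices_spec : Claim_equal_build_valid_query_indices := by
  intro total r _
  unfold Spec_build_valid_query_indices build_valid_query_indices_alt
  rw [buildA_eq_filter]
  set e1 := max 0 (total - 1 - r) with he1
  set e2 := min (total - 1) r with he2
  by_cases h : e1 > e2
  · rw [if_pos h]
    apply List.filter_eq_self.mpr
    intro qi hq
    rw [PySem.List.mem_pyRange_one] at hq
    simp only [decide_eq_true_eq]
    omega
  · rw [if_neg h]
    rw [not_lt] at h
    have h0 : (0:Int) ≤ e1 := by omega
    have h2 : e2 + 1 ≤ total := by omega
    rw [PySem.List.pyRange_one_append 0 e1 total h0 (by omega),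
        PySem.List.pyRange_one_append e1 (e2+1) total (by omega) h2,
        List.filter_append, List.filter_append]
    have hf1 : (PySem.List.pyRange 0 e1 1).filter
        (fun qi => total - (min (total - 1) (qi + r) - max 0 (qi - r) + 1) > 0)
        = PySem.List.pyRange 0 e1 1 := by
      apply List.filter_eq_self.mpr
      intro qi hq
      rw [PySem.List.mem_pyRange_one] at hq
      simp only [decide_eq_true_eq]
      omega
    have hf2 : (PySem.List.pyRange e1 (e2+1) 1).filter
        (fun qi => total - (min (total - 1) (qi + r) - max 0 (qi - r) + 1) > 0)
        = [] := by
      apply List.filter_eq_nil_iff.mpr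
      intro qi hq
      rw [PySem.List.mem_pyRange_one] at hq
      simp only [decide_eq_true_eq]
      omega
    have hf3 : (PySem.List.pyRange (e2+1) total 1).filter
        (fun qi => total - (min (total - 1) (qi + r) - max 0 (qi - r) + 1) > 0)
        = PySem.List.pyRange (e2+1) total 1 := by
      apply List.filter_eq_self.mpr
      intro qi hq
      rw [PySem.List.mem_pyRange_one] at hq
      simp only [decide_eq_true_eq]
      omega
    rw [hf1, hf2, hf3, List.nil_append]
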